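-- pv_equiv track=rewrite | github.com/ryandoro/personal-training-app | helpers.py | prioritize_movement_types
-- ===== SOURCE A (Python) =====
-- def prioritize_movement_types(rows):
--     """Return exercises ordered Compound → Accessory → Other."""
--     compounds = []
--     accessories = []
--     others = []
--     for row in rows or []:
--         movement_type = (row[-1] or '').lower()
--         if movement_type == 'compound':
--             compounds.append(row)
--         elif movement_type == 'accessory':
--             accessories.append(row)
--         else:
--             others.append(row)
--     ordered = compounds + accessories + others
--     return ordered, bool(compounds)
-- ===== SOURCE B (Python) =====
-- def prioritize_movement_types(rows):
--     """Return exercises ordered Compound -> Accessory -> Other."""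
--     rows = rows or []
--     priority = {'compound': 0, 'accessory': 1}
--     ordered = sorted(rows, key=lambda r: priority.get((r[-1] or '').lower(), 2))
--     return ordered, any((r[-1] or '').lower() == 'compound' for r in rows)
-- ===== Notes on version B (the rewrite author's own statement) =====
-- stated objective: idiomatic
-- what changed: Replaces the three-bucket partition-and-concatenate loop with a single stable sort keyed by a movement-type priority map plus an any() scan for the flag.
import Mathlib
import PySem

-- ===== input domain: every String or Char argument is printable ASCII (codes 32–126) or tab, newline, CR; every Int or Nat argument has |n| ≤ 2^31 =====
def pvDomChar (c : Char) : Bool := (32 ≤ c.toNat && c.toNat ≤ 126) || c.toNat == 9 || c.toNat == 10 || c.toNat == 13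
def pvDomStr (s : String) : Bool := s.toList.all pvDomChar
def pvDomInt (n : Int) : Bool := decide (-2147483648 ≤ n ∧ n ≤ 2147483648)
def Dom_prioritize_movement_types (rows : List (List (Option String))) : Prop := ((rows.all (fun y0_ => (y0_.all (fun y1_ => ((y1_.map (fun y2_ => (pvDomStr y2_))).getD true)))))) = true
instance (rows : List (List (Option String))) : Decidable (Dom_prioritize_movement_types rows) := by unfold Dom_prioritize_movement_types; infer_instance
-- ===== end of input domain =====

-- B replaces A's three-bucket partition-and-concatenate loop with one stable sort by a priority key plus an any() scan (idiomatic rewrite).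

-- ===== PORT A =====
-- (row[-1] or '').lower(); the `.getD none` only fills the raising case row = [], which Pre_ excludes
def pvMt (row : List (Option String)) : String :=
  PySem.Str.lower (((PySem.List.pyGet? row (-1)).getD none).getD "")

def prioritize_movement_types (rows : List (List (Option String))) : List (List (Option String)) × Bool :=
  match rows.foldl
    (fun (st : List (List (Option String)) × List (List (Option String)) × List (List (Option String))) row =>
      let movement_type := pvMt row
      if movement_type == "compound" then (st.1 ++ [row], st.2.1, st.2.2)
      else if movement_type == "accessory" then (st.1, st.2.1 ++ [row], st.2.2)
      else (st.1, st.2.1, st.2.2 ++ [row]))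
    ([], [], []) with
  | (compounds, accessories, others) => (compounds ++ accessories ++ others, !compounds.isEmpty)

-- ===== PORT B =====
-- priority.get((r[-1] or '').lower(), 2)
def pvPrio (row : List (Option String)) : Int :=
  (PySem.Dict.ofList [("compound", (0:Int)), ("accessory", 1)]).getD (pvMt row) 2

def prioritize_movement_types_alt (rows : List (List (Option String))) : List (List (Option String)) × Bool :=
  (PySem.List.sorted rows (fun r => pvPrio r) false,
   rows.any (fun r => pvMt r == "compound"))

-- ===== PRECONDITION & SPEC =====
-- Pre_ excludes inputs containing an empty row: there Python A raises IndexError on row[-1] (and B raises there too).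
def Pre_prioritize_movement_types (rows : List (List (Option String))) : Prop :=
  ∀ row ∈ rows, row ≠ []
instance (rows : List (List (Option String))) : Decidable (Pre_prioritize_movement_types rows) := by unfold Pre_prioritize_movement_types; infer_instance

def pvWitness_prioritize_movement_types : List (List (Option String)) :=
  [[some "Squat", some "Compound"], [some "Curl", some "accessory"], [some "Plank", none]]

def Spec_prioritize_movement_types (rows : List (List (Option String))) (out : List (List (Option String)) × Bool) : Prop := out = prioritize_movement_types_alt rows
instance (rows : List (List (Option String))) (out : List (List (Option String)) × Bool) : Decidable (Spec_prioritize_movement_types rows out) := by unfold Spec_prioritize_movement_types; infer_instance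

-- ===== CLAIM (what is proved, stated in full; the proofs are below) =====
def Claim_equal_prioritize_movement_types : Prop := ∀ (rows : List (List (Option String))), Dom_prioritize_movement_types rows → Pre_prioritize_movement_types rows → Spec_prioritize_movement_types rows (prioritize_movement_types rows)

-- ===== LEMMAS AND PROOFS =====

-- the three tiers of the result, as filters by priority
def pvTiers (l : List (List (Option String))) : List (List (Option String)) :=
  l.filter (fun r => pvPrio r == 0) ++ l.filter (fun r => pvPrio r == 1) ++ l.filter (fun r => pvPrio r == 2)

lemma pvPrio_eq (r : List (Option String)) :
    pvPrio r = if pvMt r == "compound" then 0 else if pvMt r == "accessory" then 1 else 2 := by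
  by_cases h1 : pvMt r = "compound"
  · simp only [pvPrio, h1]; decide
  · by_cases h2 : pvMt r = "accessory"
    · simp only [pvPrio, h2]; decide
    · have h1' : ("compound" == pvMt r) = false := by
        rw [beq_eq_false_iff_ne]; exact fun h => h1 h.symm
      have h2' : ("accessory" == pvMt r) = false := by
        rw [beq_eq_false_iff_ne]; exact fun h => h2 h.symm
      simp [pvPrio, PySem.Dict.ofList, PySem.Dict.update, PySem.Dict.empty, PySem.Dict.insert,
            PySem.Dict.getD, PySem.Dict.get?, List.find?, h1, h2, h1', h2']

lemma pvPrio_cases (r : List (Option String)) : pvPrio r = 0 ∨ pvPrio r = 1 ∨ pvPrio r = 2 := by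
  rw [pvPrio_eq]; split_ifs <;> simp

lemma prio0_iff (r : List (Option String)) : (pvPrio r == (0:Int)) = (pvMt r == "compound") := by
  rcases h1 : pvMt r == "compound"
  · have h : pvPrio r = 1 ∨ pvPrio r = 2 := by rw [pvPrio_eq, h1]; simp only [Bool.false_eq_true, if_false]; split <;> simp
    rcases h with h | h <;> simp [h]
  · simp [pvPrio_eq, h1]

lemma insertBy_append_not {α : Type} (before : α → α → Bool) (x : α) (as bs : List α)
    (h : ∀ a ∈ as, before x a = false) :
    PySem.List.insertBy before x (as ++ bs) = as ++ PySem.List.insertBy before x bs := by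
  induction as with
  | nil => simp
  | cons a as ih =>
      have ha : before x a = false := h a (by simp)
      simp only [List.cons_append, PySem.List.insertBy, ha]
      simp only [Bool.false_eq_true, if_false, List.cons.injEq, true_and]
      exact ih (fun a ha => h a (by simp [ha]))

lemma insertBy_all_before {α : Type} (before : α → α → Bool) (x : α) (bs : List α)
    (h : ∀ b ∈ bs, before x b = true) :
    PySem.List.insertBy before x bs = x :: bs := by
  cases bs with
  | nil => simp [PySem.List.insertBy]
  | cons b bs => simp [PySem.List.insertBy, h b (by simp)]

lemma mem_filter_prio (l : List (List (Option String))) (k : Int) (r : List (Option String))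
    (h : r ∈ l.filter (fun r => pvPrio r == k)) : pvPrio r = k := by
  have := (List.mem_filter.mp h).2; simpa using this

lemma ins_tiers (x : List (Option String)) (m : List (List (Option String))) :
    PySem.List.insertBy (fun a b => decide (pvPrio a < pvPrio b)) x (pvTiers m) = pvTiers (m ++ [x]) := by
  rcases pvPrio_cases x with h | h | h
  · -- prio x = 0: pass the tier-0 block, insert before everything of priority 1 or 2
    have e1 : PySem.List.insertBy (fun a b => decide (pvPrio a < pvPrio b)) x (pvTiers m)
        = m.filter (fun r => pvPrio r == 0) ++
          PySem.List.insertBy (fun a b => decide (pvPrio a < pvPrio b)) x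
            (m.filter (fun r => pvPrio r == 1) ++ m.filter (fun r => pvPrio r == 2)) := by
      rw [pvTiers, List.append_assoc]
      refine insertBy_append_not _ _ _ _ (fun a ha => ?_)
      have := mem_filter_prio _ _ _ ha
      simp [h, this]
    have e2 : PySem.List.insertBy (fun a b => decide (pvPrio a < pvPrio b)) x
        (m.filter (fun r => pvPrio r == 1) ++ m.filter (fun r => pvPrio r == 2))
        = x :: (m.filter (fun r => pvPrio r == 1) ++ m.filter (fun r => pvPrio r == 2)) := by
      refine insertBy_all_before _ _ _ (fun b hb => ?_)
      rcases List.mem_append.mp hb with hb | hb <;>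
        · have := mem_filter_prio _ _ _ hb; simp [h, this]
    rw [e1, e2]
    simp [pvTiers, List.filter_append, h]
  · -- prio x = 1: pass tiers 0 and 1, insert before tier 2
    have e1 : PySem.List.insertBy (fun a b => decide (pvPrio a < pvPrio b)) x (pvTiers m)
        = (m.filter (fun r => pvPrio r == 0) ++ m.filter (fun r => pvPrio r == 1)) ++
          PySem.List.insertBy (fun a b => decide (pvPrio a < pvPrio b)) x
            (m.filter (fun r => pvPrio r == 2)) := by
      rw [pvTiers]
      refine insertBy_append_not _ _ _ _ (fun a ha => ?_)
      rcases List.mem_append.mp ha with ha | ha <;>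
        · have := mem_filter_prio _ _ _ ha; simp [h, this]
    have e2 : PySem.List.insertBy (fun a b => decide (pvPrio a < pvPrio b)) x
        (m.filter (fun r => pvPrio r == 2)) = x :: m.filter (fun r => pvPrio r == 2) := by
      refine insertBy_all_before _ _ _ (fun b hb => ?_)
      have := mem_filter_prio _ _ _ hb; simp [h, this]
    rw [e1, e2]
    simp [pvTiers, List.filter_append, h]
  · -- prio x = 2: goes to the very end
    have e1 : PySem.List.insertBy (fun a b => decide (pvPrio a < pvPrio b)) x (pvTiers m)
        = pvTiers m ++ [x] := by
      refine PySem.List.insertBy_of_forall_not_before _ _ _ (fun a ha => ?_)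
      simp only [pvTiers, List.append_assoc, List.mem_append] at ha
      rcases ha with ha | ha | ha <;>
        · have := mem_filter_prio _ _ _ ha; simp [h, this]
    rw [e1]
    simp [pvTiers, List.filter_append, h]

lemma foldl_ins_tiers (l m : List (List (Option String))) :
    l.foldl (fun acc x => PySem.List.insertBy (fun a b => decide (pvPrio a < pvPrio b)) x acc) (pvTiers m)
      = pvTiers (m ++ l) := by
  induction l generalizing m with
  | nil => simp
  | cons x l ih =>
      simp only [List.foldl_cons, ins_tiers]
      rw [ih (m ++ [x])]; simp

lemma sorted_eq_tiers (rows : List (List (Option String))) :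
    PySem.List.sorted rows (fun r => pvPrio r) false = pvTiers rows := by
  rw [PySem.List.sorted_eq_foldl_insertBy]
  have h := foldl_ins_tiers rows []
  simpa [pvTiers] using h

lemma foldA (l : List (List (Option String)))
    (c a o : List (List (Option String))) :
    l.foldl
      (fun (st : List (List (Option String)) × List (List (Option String)) × List (List (Option String))) row =>
        let movement_type := pvMt row
        if movement_type == "compound" then (st.1 ++ [row], st.2.1, st.2.2)
        else if movement_type == "accessory" then (st.1, st.2.1 ++ [row], st.2.2)
        else (st.1, st.2.1, st.2.2 ++ [row]))
      (c, a, o)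
    = (c ++ l.filter (fun r => pvPrio r == 0),
       a ++ l.filter (fun r => pvPrio r == 1),
       o ++ l.filter (fun r => pvPrio r == 2)) := by
  induction l generalizing c a o with
  | nil => simp
  | cons x l ih =>
      rcases h1 : pvMt x == "compound"
      · rcases h2 : pvMt x == "accessory"
        · have px : pvPrio x = 2 := by simp [pvPrio_eq, h1, h2]
          simp only [List.foldl_cons, h1, h2, Bool.false_eq_true, if_false]
          rw [ih]
          simp [px]
        · have px : pvPrio x = 1 := by simp [pvPrio_eq, h1, h2]
          simp only [List.foldl_cons, h1, h2, Bool.false_eq_true, if_false, if_true]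
          rw [ih]
          simp [px]
      · have px : pvPrio x = 0 := by simp [pvPrio_eq, h1]
        simp only [List.foldl_cons, h1, if_true]
        rw [ih]
        simp [px]

lemma not_isEmpty_filter_any {α : Type} (p : α → Bool) (l : List α) :
    (!(l.filter p).isEmpty) = l.any p := by
  induction l with
  | nil => simp
  | cons x l ih =>
      rw [List.filter_cons]
      rcases h : p x <;> simp [h, ih]

lemma filter0_eq (l : List (List (Option String))) :
    l.filter (fun r => pvPrio r == (0:Int)) = l.filter (fun r => pvMt r == "compound") :=
  List.filter_congr (fun x _ => prio0_iff x)

-- ===== VERDICT (by name: the statement is the Claim_ definition above) =====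
theorem prioritize_movement_types_spec : Claim_equal_prioritize_movement_types := by
  intro rows _ _
  unfold Spec_prioritize_movement_types
  show prioritize_movement_types rows = prioritize_movement_types_alt rows
  unfold prioritize_movement_types prioritize_movement_types_alt
  rw [foldA, sorted_eq_tiers]
  simp [pvTiers, filter0_eq, not_isEmpty_filter_any]
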